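-- pv_equiv track=rewrite | github.com/Chris443C/AWS-Automation-Patching-and-Reporting | scripts/python/inspector_handler.py | categorize_findings
-- ===== SOURCE A (Python) =====
-- from typing import Dict, List, Any
--
-- def categorize_findings(findings: List[Dict[str, Any]]) -> Dict[str, List[Dict[str, Any]]]:
--     """Categorize findings by type and severity"""
--     categorized = {
--         'critical': [],
--         'high': [],
--         'medium': [],
--         'low': [],
--         'patch_related': [],
--         'non_patch_related': []
--     }
--
--     for finding in findings:
--         severity = finding.get('severity', 'UNKNOWN')
--
--         # Categorize by severity
--         if severity == 'CRITICAL':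
--             categorized['critical'].append(finding)
--         elif severity == 'HIGH':
--             categorized['high'].append(finding)
--         elif severity == 'MEDIUM':
--             categorized['medium'].append(finding)
--         elif severity == 'LOW':
--             categorized['low'].append(finding)
--
--         # Categorize by type (patch-related vs other)
--         finding_type = finding.get('type', '')
--         if any(keyword in finding_type.lower() for keyword in ['cve', 'vulnerability', 'patch']):
--             categorized['patch_related'].append(finding)
--         else:
--             categorized['non_patch_related'].append(finding)
--
--     return categorized
-- ===== SOURCE B (Python) =====
-- def categorize_findings(findings):
--     def is_patch(f):
--         t = f.get('type', '').lower()
--         return 'cve' in t or 'vulnerability' in t or 'patch' in t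
--     return {
--         'critical': [f for f in findings if f.get('severity') == 'CRITICAL'],
--         'high': [f for f in findings if f.get('severity') == 'HIGH'],
--         'medium': [f for f in findings if f.get('severity') == 'MEDIUM'],
--         'low': [f for f in findings if f.get('severity') == 'LOW'],
--         'patch_related': [f for f in findings if is_patch(f)],
--         'non_patch_related': [f for f in findings if not is_patch(f)],
--     }
-- ===== Notes on version B (the rewrite author's own statement) =====
-- stated objective: simpler
-- what changed: Replaces the single simultaneous loop appending into a pre-built six-key dict with six independent filtering passes (one list comprehension per bucket) assembled directly into the result dict.
import Mathlib
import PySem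

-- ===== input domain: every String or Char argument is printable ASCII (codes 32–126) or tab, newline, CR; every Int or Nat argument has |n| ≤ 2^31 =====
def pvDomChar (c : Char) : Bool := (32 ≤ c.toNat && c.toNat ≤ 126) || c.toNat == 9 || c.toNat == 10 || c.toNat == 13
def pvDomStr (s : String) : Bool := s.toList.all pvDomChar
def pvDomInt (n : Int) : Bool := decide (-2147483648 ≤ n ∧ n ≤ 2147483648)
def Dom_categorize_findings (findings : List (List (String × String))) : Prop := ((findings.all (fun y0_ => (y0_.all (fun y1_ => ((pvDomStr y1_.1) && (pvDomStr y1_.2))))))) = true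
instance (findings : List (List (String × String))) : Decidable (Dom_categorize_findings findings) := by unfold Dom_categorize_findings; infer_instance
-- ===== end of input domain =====

-- B changes the decomposition only: six independent filtering passes instead of A's one simultaneous loop; same values.

-- ===== PORT A =====
-- any(keyword in finding_type.lower() for keyword in ['cve', 'vulnerability', 'patch'])
def pvPatchTypeA (finding_type : String) : Bool :=
  PySem.Str.isIn "cve" (PySem.Str.lower finding_type) ||
  PySem.Str.isIn "vulnerability" (PySem.Str.lower finding_type) ||
  PySem.Str.isIn "patch" (PySem.Str.lower finding_type)

-- the mutable dict 'categorized' carried as six lists in key order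
def pvStepA (st : List (List (String × String)) × List (List (String × String)) × List (List (String × String)) ×
                  List (List (String × String)) × List (List (String × String)) × List (List (String × String)))
    (finding : List (String × String)) :
    List (List (String × String)) × List (List (String × String)) × List (List (String × String)) ×
    List (List (String × String)) × List (List (String × String)) × List (List (String × String)) :=
  let (c, h, m, l, p, n) := st
  let severity := (PySem.Dict.mk finding).getD "severity" "UNKNOWN"
  let (c, h, m, l) :=
    if severity = "CRITICAL" then (c ++ [finding], h, m, l)
    else if severity = "HIGH" then (c, h ++ [finding], m, l)
    else if severity = "MEDIUM" then (c, h, m ++ [finding], l)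
    else if severity = "LOW" then (c, h, m, l ++ [finding])
    else (c, h, m, l)
  let finding_type := (PySem.Dict.mk finding).getD "type" ""
  if pvPatchTypeA finding_type then (c, h, m, l, p ++ [finding], n)
  else (c, h, m, l, p, n ++ [finding])

def categorize_findings (findings : List (List (String × String))) : List (String × List (List (String × String))) :=
  let st := findings.foldl pvStepA ([], [], [], [], [], [])
  [("critical", st.1), ("high", st.2.1), ("medium", st.2.2.1), ("low", st.2.2.2.1),
   ("patch_related", st.2.2.2.2.1), ("non_patch_related", st.2.2.2.2.2)]

-- ===== PORT B =====
def pvIsPatchB (f : List (String × String)) : Bool :=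
  let t := PySem.Str.lower ((PySem.Dict.mk f).getD "type" "")
  PySem.Str.isIn "cve" t || PySem.Str.isIn "vulnerability" t || PySem.Str.isIn "patch" t

def pvSevB (f : List (String × String)) (s : String) : Bool :=
  (PySem.Dict.mk f).get? "severity" == some s

def categorize_findings_alt (findings : List (List (String × String))) : List (String × List (List (String × String))) :=
  [("critical", findings.filter (fun f => pvSevB f "CRITICAL")),
   ("high", findings.filter (fun f => pvSevB f "HIGH")),
   ("medium", findings.filter (fun f => pvSevB f "MEDIUM")),
   ("low", findings.filter (fun f => pvSevB f "LOW")),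
   ("patch_related", findings.filter pvIsPatchB),
   ("non_patch_related", findings.filter (fun f => !pvIsPatchB f))]

-- ===== PRECONDITION & SPEC =====
def Spec_categorize_findings (findings : List (List (String × String))) (out : List (String × List (List (String × String)))) : Prop := out = categorize_findings_alt findings
instance (findings : List (List (String × String))) (out : List (String × List (List (String × String)))) : Decidable (Spec_categorize_findings findings out) := by unfold Spec_categorize_findings; infer_instance

-- ===== CLAIM (what is proved, stated in full; the proofs are below) =====
def Claim_equal_categorize_findings : Prop := ∀ (findings : List (List (String × String))), Dom_categorize_findings findings → Spec_categorize_findings findings (categorize_findings findings)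

-- ===== LEMMAS AND PROOFS =====

theorem pvSevB_iff (f : List (String × String)) (s : String) (hs : s ≠ "UNKNOWN") :
    pvSevB f s = true ↔ (PySem.Dict.mk f).getD "severity" "UNKNOWN" = s := by
  unfold pvSevB
  rw [PySem.Dict.getD_eq_get?_getD]
  cases (PySem.Dict.mk f).get? "severity" with
  | none => exact iff_of_false (by simp) (Ne.symm hs)
  | some v => simp only [beq_iff_eq, Option.getD_some, Option.some.injEq]

theorem pvStepA_eq (c h m l p n : List (List (String × String))) (f : List (String × String)) :
    pvStepA (c, h, m, l, p, n) f =
      (c ++ (if pvSevB f "CRITICAL" then [f] else []),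
       h ++ (if pvSevB f "HIGH" then [f] else []),
       m ++ (if pvSevB f "MEDIUM" then [f] else []),
       l ++ (if pvSevB f "LOW" then [f] else []),
       p ++ (if pvIsPatchB f then [f] else []),
       n ++ (if pvIsPatchB f then [] else [f])) := by
  have hC := pvSevB_iff f "CRITICAL" (by decide)
  have hH := pvSevB_iff f "HIGH" (by decide)
  have hM := pvSevB_iff f "MEDIUM" (by decide)
  have hL := pvSevB_iff f "LOW" (by decide)
  have hpt : pvPatchTypeA ((PySem.Dict.mk f).getD "type" "") = pvIsPatchB f := rfl
  unfold pvStepA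
  simp only [hpt]
  split_ifs with h1 h2 h3 h4 h5 h6 h7 h8 h9 h10 h11 h12 h13 h14 <;> simp_all

theorem pvStepA_invariant (findings : List (List (String × String)))
    (c h m l p n : List (List (String × String))) :
    findings.foldl pvStepA (c, h, m, l, p, n) =
      (c ++ findings.filter (fun f => pvSevB f "CRITICAL"),
       h ++ findings.filter (fun f => pvSevB f "HIGH"),
       m ++ findings.filter (fun f => pvSevB f "MEDIUM"),
       l ++ findings.filter (fun f => pvSevB f "LOW"),
       p ++ findings.filter pvIsPatchB,
       n ++ findings.filter (fun f => !pvIsPatchB f)) := by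
  induction findings generalizing c h m l p n with
  | nil => simp
  | cons f fs ih =>
    rw [List.foldl_cons, pvStepA_eq, ih]
    simp only [List.filter_cons]
    cases hc : pvSevB f "CRITICAL" <;> cases hh : pvSevB f "HIGH" <;>
      cases hm : pvSevB f "MEDIUM" <;> cases hl : pvSevB f "LOW" <;>
      cases hp : pvIsPatchB f <;> simp

theorem categorize_findings_spec : Claim_equal_categorize_findings := by
  intro findings _
  show categorize_findings findings = categorize_findings_alt findings
  unfold categorize_findings categorize_findings_alt
  rw [pvStepA_invariant]
  simp only [List.nil_append]
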